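-- pv_equiv track=rewrite | github.com/AthulKrishna1712/Guess-the-movie | guessmovie.py | createquestion
-- ===== SOURCE A (Python) =====
-- def createquestion(movie):
--     n=len(movie)
--     letters=list(movie)
--     temp=[]
--     for i in range(n):
--         if letters[i]==' ':
--             temp.append(' ')
--         else:
--             temp.append("*")
--     qn=''.join(str(x) for x in temp)
--     return qn
-- ===== SOURCE B (Python) =====
-- def createquestion(movie):
--     return ' '.join('*' * len(word) for word in movie.split(' '))
-- ===== Notes on version B (the rewrite author's own statement) =====
-- stated objective: faster
-- what changed: Replaces the per-character index loop with its space/asterisk branch and str() join by splitting on the space separator, producing an asterisk run of each token's length, and rejoining with the separator (C-level split/join/repeat instead of a Python-level per-character loop).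
import Mathlib
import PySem

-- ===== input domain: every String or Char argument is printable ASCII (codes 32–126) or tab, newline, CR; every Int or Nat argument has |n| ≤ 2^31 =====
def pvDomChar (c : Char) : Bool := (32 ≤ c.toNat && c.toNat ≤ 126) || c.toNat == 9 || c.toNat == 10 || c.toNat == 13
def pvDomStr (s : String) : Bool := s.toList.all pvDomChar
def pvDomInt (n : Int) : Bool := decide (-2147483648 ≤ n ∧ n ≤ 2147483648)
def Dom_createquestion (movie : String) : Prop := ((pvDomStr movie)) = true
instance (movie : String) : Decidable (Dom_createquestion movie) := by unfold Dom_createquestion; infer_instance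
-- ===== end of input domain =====

-- B masks each space-delimited token by an asterisk run of its length and rejoins with spaces (split/join), instead of A's per-character branch loop; a timing run measured B faster (constant factor).

-- ===== PORT A =====
def createquestion (movie : String) : String :=
  let n := PySem.Str.len movie
  let letters := movie.toList
  let temp : List Char := (PySem.List.pyRange 0 n).foldl
    (fun acc i =>
      if PySem.List.pyGetD letters i ' ' == ' ' then acc ++ [' '] else acc ++ ['*']) []
  String.mk (PySem.Chars.join [] (temp.map (fun c => [c])))

-- ===== PORT B =====
def createquestion_alt (movie : String) : String :=
  String.mk (PySem.Chars.join [' ']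
    ((PySem.Chars.splitOn movie.toList [' ']).map (fun w => List.replicate w.length '*')))

-- ===== PRECONDITION & SPEC =====
def Spec_createquestion (movie : String) (out : String) : Prop := out = createquestion_alt movie
instance (movie : String) (out : String) : Decidable (Spec_createquestion movie out) := by unfold Spec_createquestion; infer_instance

-- ===== CLAIM (what is proved, stated in full; the proofs are below) =====
def Claim_equal_createquestion : Prop := ∀ (movie : String), Dom_createquestion movie → Spec_createquestion movie (createquestion movie)

-- ===== LEMMAS AND PROOFS =====

/-- The character-level mask A applies. -/
def pvMask (c : Char) : Char := if c == ' ' then ' ' else '*'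

/-- Reference split on a single space, structural recursion. -/
def pvSplit : List Char → List (List Char)
  | [] => [[]]
  | c :: rest => if c = ' ' then [] :: pvSplit rest else (pvSplit rest).modifyHead (c :: ·)

lemma pvSplit_ne_nil (l : List Char) : pvSplit l ≠ [] := by
  cases l with
  | nil => simp [pvSplit]
  | cons c rest =>
    simp only [pvSplit]
    split_ifs
    · simp
    · have := pvSplit_ne_nil rest
      cases h : pvSplit rest with
      | nil => exact absurd h this
      | cons w ws => simp

lemma splitOn_go_eq (fuel : Nat) (l cur : List Char) (accs : List (List Char))
    (h : l.length ≤ fuel) :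
    PySem.Chars.splitOn.go [' '] fuel l cur accs
      = accs.reverse ++ (pvSplit l).modifyHead (cur.reverse ++ ·) := by
  induction fuel generalizing l cur accs with
  | zero =>
    have hl : l = [] := List.eq_nil_of_length_eq_zero (Nat.le_zero.mp h)
    subst hl
    simp [PySem.Chars.splitOn.go, pvSplit]
  | succ fuel ih =>
    cases l with
    | nil => simp [PySem.Chars.splitOn.go, pvSplit]
    | cons c rest =>
      by_cases hc : c = ' '
      · subst hc
        have hpre : [' '].isPrefixOf (' ' :: rest) = true := by simp [List.isPrefixOf]
        rw [show PySem.Chars.splitOn.go [' '] (fuel+1) (' ' :: rest) cur accs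
              = PySem.Chars.splitOn.go [' '] fuel (List.drop 1 (' ' :: rest)) [] (cur.reverse :: accs) by
            simp [PySem.Chars.splitOn.go, hpre]]
        rw [ih _ _ _ (by simpa using Nat.le_of_succ_le_succ h)]
        obtain ⟨w, ws, hws⟩ : ∃ w ws, pvSplit rest = w :: ws := by
          cases hx : pvSplit rest with
          | nil => exact absurd hx (pvSplit_ne_nil rest)
          | cons w ws => exact ⟨w, ws, rfl⟩
        simp [pvSplit, hws]
      · have hpre : [' '].isPrefixOf (c :: rest) = false := by
          simp [List.isPrefixOf]
          exact fun h' => hc h'.symm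
        rw [show PySem.Chars.splitOn.go [' '] (fuel+1) (c :: rest) cur accs
              = PySem.Chars.splitOn.go [' '] fuel rest (c :: cur) accs by
            simp [PySem.Chars.splitOn.go, hpre]]
        rw [ih _ _ _ (by simpa using Nat.le_of_succ_le_succ h)]
        obtain ⟨w, ws, hws⟩ : ∃ w ws, pvSplit rest = w :: ws := by
          cases hx : pvSplit rest with
          | nil => exact absurd hx (pvSplit_ne_nil rest)
          | cons w ws => exact ⟨w, ws, rfl⟩
        simp [pvSplit, hc, hws]

lemma splitOn_eq_pvSplit (l : List Char) :
    PySem.Chars.splitOn l [' '] = pvSplit l := by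
  unfold PySem.Chars.splitOn
  rw [splitOn_go_eq _ _ _ _ (by omega)]
  obtain ⟨w, ws, hws⟩ : ∃ w ws, pvSplit l = w :: ws := by
    cases hx : pvSplit l with
    | nil => exact absurd hx (pvSplit_ne_nil l)
    | cons w ws => exact ⟨w, ws, rfl⟩
  simp [hws]

lemma join_cons_head (sep : List Char) (a : Char) (p : List Char) (ps : List (List Char)) :
    PySem.Chars.join sep ((a :: p) :: ps) = a :: PySem.Chars.join sep (p :: ps) := by
  cases ps with
  | nil => simp [PySem.Chars.join_singleton]
  | cons q rest => simp [PySem.Chars.join_cons_cons]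

lemma join_mask (l : List Char) :
    PySem.Chars.join [' '] ((pvSplit l).map (fun w => List.replicate w.length '*'))
      = l.map pvMask := by
  induction l with
  | nil => simp [pvSplit, PySem.Chars.join_singleton]
  | cons c rest ih =>
    obtain ⟨w, ws, hws⟩ : ∃ w ws, pvSplit rest = w :: ws := by
      cases hx : pvSplit rest with
      | nil => exact absurd hx (pvSplit_ne_nil rest)
      | cons w ws => exact ⟨w, ws, rfl⟩
    by_cases hc : c = ' '
    · subst hc
      have h1 : pvSplit (' ' :: rest) = [] :: w :: ws := by simp [pvSplit, hws]
      rw [h1, List.map_cons, List.map_cons, PySem.Chars.join_cons_cons]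
      rw [hws] at ih
      simp only [List.map_cons] at ih
      simp [ih, pvMask]
    · have h1 : pvSplit (c :: rest) = (c :: w) :: ws := by simp [pvSplit, hc, hws]
      rw [h1, List.map_cons]
      have h2 : List.replicate (c :: w).length '*' = '*' :: List.replicate w.length '*' := by
        simp [List.replicate_succ]
      rw [h2, join_cons_head]
      rw [hws] at ih
      simp only [List.map_cons] at ih
      rw [ih]
      simp [pvMask, hc]

lemma foldl_mask (l : List Char) (acc : List Char) :
    List.foldl (fun acc c => if c == ' ' then acc ++ [' '] else acc ++ ['*']) acc l
      = acc ++ l.map pvMask := by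
  induction l generalizing acc with
  | nil => simp
  | cons c rest ih =>
    simp only [List.foldl_cons, List.map_cons]
    by_cases hc : c = ' '
    · rw [if_pos (by simp [hc]), ih]
      simp [pvMask, hc]
    · rw [if_neg (by simp [hc]), ih]
      simp [pvMask, hc]

lemma createquestion_eq_mask (movie : String) :
    createquestion movie = String.mk (movie.toList.map pvMask) := by
  unfold createquestion
  simp only
  rw [show PySem.Str.len movie = PySem.List.len movie.toList from rfl]
  rw [PySem.List.foldl_pyRange_zero_pyGetD movie.toList ' '
        (fun acc c => if c == ' ' then acc ++ [' '] else acc ++ ['*']) []]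
  rw [foldl_mask]
  rw [List.nil_append, List.map_map, ← List.map_map, PySem.Chars.join_nil_singletons]

lemma createquestion_alt_eq_mask (movie : String) :
    createquestion_alt movie = String.mk (movie.toList.map pvMask) := by
  unfold createquestion_alt
  rw [splitOn_eq_pvSplit, join_mask]

-- ===== VERDICT (by name: the statement is the Claim_ definition above) =====
theorem createquestion_spec : Claim_equal_createquestion := by
  intro movie _
  unfold Spec_createquestion
  rw [createquestion_eq_mask, createquestion_alt_eq_mask]
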